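/- GENERATED by farm/mkstatement.py from design/units.tsv (unit `inverse_mdct.2`) and the assertions of Vorbis/Spec/MdctTop.lean — do not edit.
   THE STATEMENT of the proof unit `inverse_mdct.2`: segment 2 of `inverse_mdct` (40 instructions; entries 0x1093a2;
   exits 0x109471; ranges 0x10930d-0x1093bf)
   takes each of its entry assertions to one of its exit assertions (`Vorbis.Spec.inverse_mdct.Seg2`), given the contracts of its callees.
   What the names mean: Vorbis/Spec/Basic.lean (the shared hypotheses), Vorbis/Spec/MdctTop.lean (the assertions). The theorem to prove:
   `theorem inverse_mdct_2_ok : Vorbis.Spec.inverse_mdct_2.Statement`. -/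
import Vorbis.Spec.MdctTop
namespace Vorbis.Spec.inverse_mdct_2
open X86 X86.User Asan

/-- The statement of unit `inverse_mdct.2`. -/
def Statement : Prop :=
  ∀ (Lay : Layout) (_hLay : Lay.hi = 0x1000000) (μ : Microarch) (_hμ : UserX.MicroOK μ) (u₀ : State)
    (_hcode : HasCodeNat Lay u₀ Vorbis.L.inverse_mdct.entry Vorbis.Code.code_inverse_mdct.nat Vorbis.L.inverse_mdct.size)
    (_h_asan_load4_noabort : Asan.SmallCheck Lay μ Vorbis.WayInv (Vorbis.CodeOK u₀) [.rax, .rcx, .rdx] 4 Vorbis.L.__asan_load4_noabort.entry)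
    (_h_asan_store4_noabort : Asan.SmallCheck Lay μ Vorbis.WayInv (Vorbis.CodeOK u₀) [.rax, .rcx, .rdx] 4 Vorbis.L.__asan_store4_noabort.entry),
    Vorbis.Spec.inverse_mdct.Seg2 Lay μ u₀

end Vorbis.Spec.inverse_mdct_2
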